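-- pv_equiv track=rewrite | github.com/ltatka/evolution | doubleCheckOscillators.py | countReactions
-- ===== SOURCE A (Python) =====
-- def countReactions(astr):
--     astr = astr.splitlines()
--     reactionCount = 0
--     for line in astr:
--         if '->' in line and not line.startswith('#'):
--             reactionCount += 1
--         if line.startswith('k'):
--             break
--     return reactionCount
-- ===== SOURCE B (Python) =====
-- def countReactions(astr):
--     lines = astr.splitlines()
--     idx = next((i for i, l in enumerate(lines) if l.startswith('k')), None)
--     prefix = lines if idx is None else lines[:idx + 1]
--     return sum(1 for l in prefix if '->' in l and not l.startswith('#'))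
-- ===== Notes on version B (the rewrite author's own statement) =====
-- stated objective: alternative
-- what changed: Replaces A's single stateful loop with count-and-break by two separate passes: first locate the boundary (first line starting with 'k'), then count matching lines over the resulting slice.
import Mathlib
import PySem

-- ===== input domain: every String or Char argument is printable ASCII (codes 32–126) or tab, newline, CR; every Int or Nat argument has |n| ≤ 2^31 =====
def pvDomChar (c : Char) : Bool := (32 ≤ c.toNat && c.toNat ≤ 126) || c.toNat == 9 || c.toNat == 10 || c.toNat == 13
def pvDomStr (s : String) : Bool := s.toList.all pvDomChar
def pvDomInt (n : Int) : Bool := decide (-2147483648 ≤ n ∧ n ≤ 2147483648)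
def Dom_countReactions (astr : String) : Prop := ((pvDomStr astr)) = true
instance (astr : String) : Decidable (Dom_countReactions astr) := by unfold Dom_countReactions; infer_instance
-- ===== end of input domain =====

-- B replaces A's single count-and-break loop by two passes: locate the first 'k'-line, then count over the slice (alternative decomposition, same cost).

-- ===== PORT A =====
-- A's for-loop with break, as structural recursion over the remaining lines.
def countReactionsLoop : List String → Int
  | [] => 0
  | l :: rest =>
    let c : Int := if PySem.Str.isIn "->" l && !(PySem.Str.startswith l "#") then 1 else 0
    if PySem.Str.startswith l "k" then c else c + countReactionsLoop rest

def countReactions (astr : String) : Int :=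
  countReactionsLoop (PySem.Str.splitlines astr)

-- ===== PORT B =====
def countReactions_alt (astr : String) : Int :=
  let lines := PySem.Str.splitlines astr
  let idx := lines.findIdx? (fun l => PySem.Str.startswith l "k")
  let pref := match idx with
    | none => lines
    | some i => lines.take (i + 1)     -- lines[:i+1], i ≥ 0 so take is exact
  ((pref.filter (fun l => PySem.Str.isIn "->" l && !(PySem.Str.startswith l "#"))).length : Int)

-- ===== PRECONDITION & SPEC =====
def Spec_countReactions (astr : String) (out : Int) : Prop := out = countReactions_alt astr
instance (astr : String) (out : Int) : Decidable (Spec_countReactions astr out) := by unfold Spec_countReactions; infer_instance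

-- ===== CLAIM (what is proved, stated in full; the proofs are below) =====
def Claim_equal_countReactions : Prop := ∀ (astr : String), Dom_countReactions astr → Spec_countReactions astr (countReactions astr)

-- ===== LEMMAS AND PROOFS =====
theorem filter_cons_len (c : String → Bool) (l : String) (xs : List String) :
    (((l :: xs).filter c).length : Int) =
      (if c l = true then (1 : Int) else 0) + ((xs.filter c).length : Int) := by
  by_cases h : c l = true <;> simp only [List.filter_cons, h, if_true, if_false,
    Bool.false_eq_true, List.length_cons] <;> push_cast <;> ring

theorem countReactionsLoop_eq (ls : List String) :
    countReactionsLoop ls =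
      (((match ls.findIdx? (fun l => PySem.Str.startswith l "k") with
          | none => ls
          | some i => ls.take (i + 1)).filter
            (fun l => PySem.Str.isIn "->" l && !(PySem.Str.startswith l "#"))).length : Int) := by
  induction ls with
  | nil => rfl
  | cons l rest ih =>
    rw [List.findIdx?_cons]
    by_cases hk : PySem.Str.startswith l "k" = true
    · simp only [countReactionsLoop, hk, if_true]
      rw [List.take_succ_cons, List.take_zero, filter_cons_len]
      simp
    · rw [Bool.not_eq_true] at hk
      simp only [countReactionsLoop, hk, Bool.false_eq_true, if_false]
      rw [ih]
      cases hfi : rest.findIdx? (fun l => PySem.Str.startswith l "k") with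
      | none =>
        simp only [hfi, Option.map_none]
        rw [filter_cons_len]
      | some i =>
        simp only [hfi, Option.map_some, List.take_succ_cons]
        rw [filter_cons_len]

-- ===== VERDICT (by name: the statement is the Claim_ definition above) =====
theorem countReactions_spec : Claim_equal_countReactions := by
  intro astr _
  unfold Spec_countReactions countReactions countReactions_alt
  exact countReactionsLoop_eq _
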